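-- pv_equiv track=rewrite | github.com/mrayva/FIVM-VLDBJ | examples/tods26-experiments/plots/generate_round_plots.py | split_rounds
-- ===== SOURCE A (Python) =====
-- from typing import List, Dict, Tuple
--
-- def split_rounds(rows: List[Dict[str, str]]) -> Tuple[List[str], List[List[Dict[str, str]]]]:
--     # infer source order by first occurrence
--     order = []
--     seen = set()
--     for r in rows:
--         src = r["source"]
--         if src not in seen:
--             order.append(src)
--             seen.add(src)
--     if not order:
--         return [], []
--     round_size = len(order)
--     rounds = []
--     cur = []
--     pos = 0
--     for r in rows:
--         cur.append(r)
--         pos += 1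
--         if pos == round_size:
--             rounds.append(cur)
--             cur = []
--             pos = 0
--     if cur:
--         rounds.append(cur)
--     return order, rounds
-- ===== SOURCE B (Python) =====
-- from typing import List, Dict, Tuple
--
-- def split_rounds(rows: List[Dict[str, str]]) -> Tuple[List[str], List[List[Dict[str, str]]]]:
--     order = list(dict.fromkeys(r["source"] for r in rows))
--     if not order:
--         return [], []
--     k = len(order)
--     return order, [rows[i:i + k] for i in range(0, len(rows), k)]
-- ===== Notes on version B (the rewrite author's own statement) =====
-- stated objective: simpler
-- what changed: Replaces the manual seen-set/order loop with an order-preserving dict.fromkeys dedup and replaces the accumulator/counter chunking loop with stride slicing over range(0, len(rows), k).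
import Mathlib
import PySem

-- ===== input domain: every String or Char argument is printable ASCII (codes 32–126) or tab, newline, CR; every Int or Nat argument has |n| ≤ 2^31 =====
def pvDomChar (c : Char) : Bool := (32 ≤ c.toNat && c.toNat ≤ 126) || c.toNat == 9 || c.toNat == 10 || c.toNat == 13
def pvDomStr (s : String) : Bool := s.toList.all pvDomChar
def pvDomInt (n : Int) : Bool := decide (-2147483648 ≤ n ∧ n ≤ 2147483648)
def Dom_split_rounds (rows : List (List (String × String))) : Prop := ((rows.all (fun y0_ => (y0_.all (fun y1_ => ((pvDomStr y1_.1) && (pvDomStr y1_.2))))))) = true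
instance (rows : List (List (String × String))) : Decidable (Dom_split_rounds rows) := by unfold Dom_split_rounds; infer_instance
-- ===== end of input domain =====

-- B replaces A's seen-set/order loop by an order-preserving dedup and A's
-- accumulator/counter chunking loop by stride slicing (objective: simpler).

-- ===== PORT A =====
-- r["source"] ported by hand as first-match assoc lookup (exact Python dict
-- lookup on the insertion-order model); under Pre_ the key is present, so the
-- default "" is never taken.
def pvGetSource (r : List (String × String)) : String :=
  ((r.find? (fun p => p.1 == "source")).map (·.2)).getD ""
def split_rounds (rows : List (List (String × String))) : List String × (List (List (List (String × String)))) :=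
  let os := rows.foldl
    (fun (st : List String × PySem.Set String) r =>
      let src := pvGetSource r
      if st.2.contains src then st else (st.1 ++ [src], PySem.Set.add st.2 src))
    ([], PySem.Set.empty)
  let order := os.1
  if order.isEmpty then ([], [])
  else
    let roundSize := order.length
    let st := rows.foldl
      (fun (st : List (List (List (String × String))) × List (List (String × String)) × Nat) r =>
        let cur := st.2.1 ++ [r]
        let pos := st.2.2 + 1
        if pos = roundSize then (st.1 ++ [cur], ([], 0)) else (st.1, (cur, pos)))
      ([], ([], 0))
    let rounds := if st.2.1.isEmpty then st.1 else st.1 ++ [st.2.1]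
    (order, rounds)

-- ===== PORT B =====
def split_rounds_alt (rows : List (List (String × String))) : List String × (List (List (List (String × String)))) :=
  let order := PySem.List.dedup (rows.map (fun r => pvGetSource r))
  if order.isEmpty then ([], [])
  else
    let k := order.length
    (order,
      (PySem.List.pyRange 0 (rows.length : Int) (k : Int)).map
        (fun i => PySem.List.slice rows (some i) (some (i + (k : Int)))))

-- ===== PRECONDITION & SPEC =====
-- Pre_ excludes rows missing the "source" key, on which Python A raises KeyError.
def Pre_split_rounds (rows : List (List (String × String))) : Prop :=
  (rows.all (fun r => r.any (fun p => p.1 == "source"))) = true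
instance (rows : List (List (String × String))) : Decidable (Pre_split_rounds rows) := by
  unfold Pre_split_rounds; infer_instance
def pvWitness_split_rounds : (List (List (String × String))) :=
  [[("source", "a"), ("v", "1")], [("source", "b"), ("v", "2")], [("source", "a"), ("v", "3")]]
def Spec_split_rounds (rows : List (List (String × String))) (out : List String × (List (List (List (String × String))))) : Prop := out = split_rounds_alt rows
instance (rows : List (List (String × String))) (out : List String × (List (List (List (String × String))))) : Decidable (Spec_split_rounds rows out) := by unfold Spec_split_rounds; infer_instance

-- ===== CLAIM (what is proved, stated in full; the proofs are below) =====
def Claim_equal_split_rounds : Prop := ∀ (rows : List (List (String × String))), Dom_split_rounds rows → Pre_split_rounds rows → Spec_split_rounds rows (split_rounds rows)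

-- ===== LEMMAS AND PROOFS =====

-- chunks of size (k+1)
def pvChunks {α : Type} (k : Nat) : List α → List (List α)
  | [] => []
  | x :: t => (x :: t.take k) :: pvChunks k (t.drop k)
  termination_by xs => xs.length
  decreasing_by simp

theorem pvChunks_nil {α : Type} (k : Nat) : pvChunks k ([] : List α) = [] := by
  rw [pvChunks.eq_def]

theorem pvChunks_cons' {α : Type} (k : Nat) (x : α) (t : List α) :
    pvChunks k (x :: t) = (x :: t.take k) :: pvChunks k (t.drop k) := by
  rw [pvChunks.eq_def]

-- one full chunk peels off the front
theorem pvChunks_cons {α : Type} (k : Nat) (l t : List α) (h : l.length = k + 1) :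
    pvChunks k (l ++ t) = l :: pvChunks k t := by
  match l with
  | [] => simp at h
  | x :: l' =>
    have hl' : l'.length = k := by simpa using h
    rw [List.cons_append, pvChunks_cons']
    rw [List.take_append_of_le_length (by omega), List.drop_append_of_le_length (by omega)]
    rw [List.take_of_length_le (by omega), List.drop_of_length_le (by omega)]
    simp

-- A's chunking loop, abstracted
def pvStep {α : Type} (sz : Nat) :
    (List (List α) × List α × Nat) → α → (List (List α) × List α × Nat) :=
  fun st r =>
    let c := st.2.1 ++ [r]
    let pos := st.2.2 + 1
    if pos = sz then (st.1 ++ [c], ([], 0)) else (st.1, (c, pos))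

def pvFinish {α : Type} (p : List (List α) × List α × Nat) : List (List α) :=
  if p.2.1.isEmpty then p.1 else p.1 ++ [p.2.1]

-- A's first loop keeps order = seen (as lists), and each step is Set.add.
theorem pvOrderLoop {α : Type} (g : α → String) :
    ∀ (l : List α) (acc : List String),
      l.foldl (fun (st : List String × PySem.Set String) r =>
          let src := g r
          if st.2.contains src then st else (st.1 ++ [src], PySem.Set.add st.2 src))
        (acc, acc)
      = (l.foldl (fun a r => PySem.Set.add a (g r)) acc,
         l.foldl (fun a r => PySem.Set.add a (g r)) acc) := by
  intro l
  induction l with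
  | nil => intro acc; rfl
  | cons r t ih =>
    intro acc
    simp only [List.foldl_cons, PySem.Set.add] at ih ⊢
    by_cases h : g r ∈ acc
    · simpa [h] using ih acc
    · simpa [h] using ih (acc ++ [g r])

-- A's chunking loop computes pvChunks.
theorem pvALoop {α : Type} (k : Nat) :
    ∀ (l : List α) (acc : List (List α)) (cur : List α), cur.length ≤ k →
      pvFinish (l.foldl (pvStep (k + 1)) (acc, (cur, cur.length)))
      = acc ++ pvChunks k (cur ++ l) := by
  intro l
  induction l with
  | nil =>
    intro acc cur hc
    rw [List.foldl_nil, List.append_nil]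
    match cur with
    | [] => simp [pvFinish, pvChunks_nil]
    | x :: c' =>
      have hc' : c'.length ≤ k := by simp at hc; omega
      simp [pvFinish, pvChunks_cons', List.take_of_length_le hc',
            List.drop_of_length_le hc', pvChunks_nil]
  | cons r t ih =>
    intro acc cur hc
    rw [List.foldl_cons]
    have hstep : pvStep (k + 1) (acc, (cur, cur.length)) r
        = if cur.length + 1 = k + 1 then (acc ++ [cur ++ [r]], ([], 0))
          else (acc, (cur ++ [r], cur.length + 1)) := rfl
    by_cases h : cur.length + 1 = k + 1
    · rw [hstep, if_pos h]
      have h2 := ih (acc ++ [cur ++ [r]]) [] (Nat.zero_le k)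
      rw [List.length_nil] at h2
      rw [h2, List.nil_append]
      have hlen : (cur ++ [r]).length = k + 1 := by simp; omega
      rw [show cur ++ r :: t = (cur ++ [r]) ++ t by simp, pvChunks_cons k _ t hlen]
      simp
    · rw [hstep, if_neg h]
      have hlen : cur.length + 1 = (cur ++ [r]).length := by simp
      rw [hlen]
      rw [ih acc (cur ++ [r]) (by simp at hc ⊢; omega)]
      simp

-- the stride-slice comprehension computes pvChunks.
theorem pvBLoop {α : Type} (k : Nat) :
    ∀ (xs : List α),
      (List.range ((xs.length + k) / (k + 1))).map
        (fun j => (xs.drop ((k + 1) * j)).take (k + 1))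
      = pvChunks k xs := by
  intro xs
  induction xs using pvChunks.induct k with
  | case1 => simp [pvChunks_nil, Nat.div_eq_of_lt (Nat.lt_succ_self k)]
  | case2 x t ih =>
    have hdiv : ((x :: t).length + k) / (k + 1) = ((x :: t).length + k - (k + 1)) / (k + 1) + 1 :=
      Nat.div_eq_sub_div (Nat.succ_pos k) (by simp only [List.length_cons]; omega)
    have hm : ((x :: t).length + k) / (k + 1) = ((t.drop k).length + k) / (k + 1) + 1 := by
      rw [hdiv]
      by_cases hlt : k ≤ t.length
      · have e : (x :: t).length + k - (k + 1) = (t.drop k).length + k := by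
          simp only [List.length_cons, List.length_drop]; omega
        rw [e]
      · have e1 : (x :: t).length + k - (k + 1) = t.length := by
          simp only [List.length_cons]; omega
        have e2 : (t.drop k).length + k = k := by
          simp only [List.length_drop]; omega
        rw [e1, e2, Nat.div_eq_of_lt (by omega), Nat.div_eq_of_lt (Nat.lt_succ_self k)]
    rw [hm, List.range_succ_eq_map, List.map_cons, List.map_map, pvChunks_cons']
    congr 1
    simp only [List.length_drop] at ih
    rw [← ih]
    simp only [List.length_drop]
    apply List.map_congr_left
    intro j _
    simp only [Function.comp_apply]
    have e3 : (k + 1) * Nat.succ j = ((k + 1) * j + k) + 1 := by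
      simp only [Nat.succ_eq_add_one]; ring
    rw [e3, List.drop_succ_cons, List.drop_drop, Nat.add_comm ((k + 1) * j) k]

-- pyRange/slice form of B's comprehension equals the Nat drop/take form.
theorem pvBRange {α : Type} (k : Nat) (xs : List α) :
    (PySem.List.pyRange 0 (xs.length : Int) ((k + 1 : Nat) : Int)).map
      (fun i => PySem.List.slice xs (some i) (some (i + ((k + 1 : Nat) : Int))))
    = (List.range ((xs.length + k) / (k + 1))).map
        (fun j => (xs.drop ((k + 1) * j)).take (k + 1)) := by
  rw [PySem.List.pyRange_of_pos _ _ (by positivity)]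
  rw [List.map_map]
  have hM : (if (0 : Int) < (xs.length : Int) then
      (((xs.length : Int) - 0 + ((k + 1 : Nat) : Int) - 1) / ((k + 1 : Nat) : Int)).toNat else 0)
      = (xs.length + k) / (k + 1) := by
    by_cases h : 0 < xs.length
    · rw [if_pos (by exact_mod_cast h)]
      have h1 : ((xs.length : Int) - 0 + ((k + 1 : Nat) : Int) - 1) = ((xs.length + k : Nat) : Int) := by
        push_cast; ring
      rw [h1, ← Int.natCast_div, Int.toNat_natCast]
    · have hx : xs.length = 0 := by omega
      rw [hx]
      simp [Nat.div_eq_of_lt (Nat.lt_succ_self k)]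
  rw [hM]
  apply List.map_congr_left
  intro j _
  have h2 : (0 : Int) + ((k + 1 : Nat) : Int) * (j : Int) = (((k + 1) * j : Nat) : Int) := by
    push_cast; ring
  simp only [Function.comp_apply]
  rw [h2, PySem.List.slice_natCast_add]

-- ===== VERDICT (by name: the statement is the Claim_ definition above) =====
theorem split_rounds_spec : Claim_equal_split_rounds := by
  intro rows _ _
  unfold Spec_split_rounds split_rounds split_rounds_alt
  set g : List (String × String) → String := fun r => pvGetSource r with hg
  have horder : (rows.foldl
      (fun (st : List String × PySem.Set String) r =>
        let src := g r
        if st.2.contains src then st else (st.1 ++ [src], PySem.Set.add st.2 src))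
      ([], PySem.Set.empty)).1
      = PySem.Set.ofList (rows.map g) := by
    rw [show (([], PySem.Set.empty) : List String × PySem.Set String)
          = (([] : List String), ([] : List String)) from rfl]
    rw [pvOrderLoop g rows []]
    simp [PySem.Set.ofList, PySem.Set.empty, List.foldl_map]
  have hded : PySem.List.dedup (rows.map g) = PySem.Set.ofList (rows.map g) := rfl
  simp only [← hg, horder, hded]
  by_cases hO : (PySem.Set.ofList (rows.map g)).isEmpty
  · simp [hO]
  · rw [if_neg hO, if_neg hO]
    obtain ⟨k, hk⟩ : ∃ k, (PySem.Set.ofList (rows.map g)).length = k + 1 := by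
      cases h : PySem.Set.ofList (rows.map g) with
      | nil => rw [h] at hO; exact absurd rfl hO
      | cons a t => exact ⟨t.length, by simp⟩
    rw [hk]
    refine congrArg (Prod.mk _) ?_
    show pvFinish (rows.foldl (pvStep (k + 1))
        ([], ([], ([] : List (List (String × String))).length))) = _
    rw [pvALoop k rows [] [] (Nat.zero_le k), List.nil_append, List.nil_append,
        ← pvBLoop k rows, ← pvBRange k rows]
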